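-- pv_equiv track=rewrite | github.com/cgarcia-UCO/PonyGE2 | src/utilities/misc/nested_conds_2_rules_list.py | divide_ant_cons
-- ===== SOURCE A (Python) =====
-- def divide_ant_cons(string):
--     """
--     This function divides a string by the first ',' not in any set of parenthesis.
--     (I know that) This can be done with regular expressions. I do not know if this would be more efficient
--
--     :param string: any string, although it is supposed to match the expression .*,.*
--     :return: a tuple with the first part of the string and the second one
--     """
--     i = 0
--     num_open_parenthesis = 0
--
--     while i < len(string) and (string[i] != ',' or num_open_parenthesis != 0):
--         if string[i] == '(':
--             num_open_parenthesis += 1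
--         elif string[i] == ')':
--             num_open_parenthesis -= 1
--
--         i += 1
--
--     return string[:i], string[i + 1:]
-- ===== SOURCE B (Python) =====
-- def divide_ant_cons(string):
--     """
--     Two-pass version: first build the table of parenthesis depths before each
--     position, then search it for the first top-level comma.
--     """
--     depth = [0]
--     for c in string:
--         depth.append(depth[-1] + (c == '(') - (c == ')'))
--     i = next((k for k, c in enumerate(string) if c == ',' and depth[k] == 0),
--              len(string))
--     return string[:i], string[i + 1:]
-- ===== Notes on version B (the rewrite author's own statement) =====
-- stated objective: alternative
-- what changed: Replaced A's single fused while-loop (index + running counter, complex stop condition) by two passes: a precomputed depth table over the string, then a generator search for the first comma at depth 0.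
import Mathlib
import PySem

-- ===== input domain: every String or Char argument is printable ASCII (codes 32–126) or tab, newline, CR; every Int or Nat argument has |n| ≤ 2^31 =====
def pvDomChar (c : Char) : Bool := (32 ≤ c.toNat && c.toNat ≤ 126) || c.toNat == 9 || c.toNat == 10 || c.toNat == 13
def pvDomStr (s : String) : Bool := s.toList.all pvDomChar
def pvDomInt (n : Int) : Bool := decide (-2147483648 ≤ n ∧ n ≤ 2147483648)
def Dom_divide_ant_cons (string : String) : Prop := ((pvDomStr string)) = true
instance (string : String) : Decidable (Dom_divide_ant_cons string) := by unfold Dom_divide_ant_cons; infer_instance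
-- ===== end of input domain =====

-- B replaces A's fused while-loop by two passes (a depth table, then a search); alternative decomposition, same cost.

-- ===== PORT A =====
-- the while loop: continues while the current char is not a top-level comma; i counts chars consumed
def pvALoop : List Char → Int → Nat → Nat
  | [], _, i => i
  | c :: rest, n, i =>
    if c = ',' ∧ n = 0 then i
    else pvALoop rest (if c = '(' then n + 1 else if c = ')' then n - 1 else n) (i + 1)

-- string[:i] / string[i+1:] with 0 ≤ i are exactly take i / drop (i+1) on the code points
def divide_ant_cons (string : String) : String × String :=
  let l := string.toList
  let i := pvALoop l 0 0
  (String.ofList (l.take i), String.ofList (l.drop (i + 1)))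

-- ===== PORT B =====
-- depth[-1] + (c == '(') - (c == ')')
def pvDelta (c : Char) : Int := (if c = '(' then 1 else 0) - (if c = ')' then 1 else 0)

-- pass 1: the depth before each position (depth[k] for k = 0..n-1, as used by the search)
def pvDepths : List Char → Int → List Int
  | [], _ => []
  | c :: rest, d => d :: pvDepths rest (d + pvDelta c)

-- pass 2: next((k for k, c in enumerate(string) if c == ',' and depth[k] == 0), len(string))
def pvFind : List (Char × Int) → Nat → Option Nat
  | [], _ => none
  | (c, d) :: rest, k => if c = ',' ∧ d = 0 then some k else pvFind rest (k + 1)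

def divide_ant_cons_alt (string : String) : String × String :=
  let l := string.toList
  let i := (pvFind (l.zip (pvDepths l 0)) 0).getD l.length
  (String.ofList (l.take i), String.ofList (l.drop (i + 1)))

-- ===== PRECONDITION & SPEC =====
def Spec_divide_ant_cons (string : String) (out : String × String) : Prop := out = divide_ant_cons_alt string
instance (string : String) (out : String × String) : Decidable (Spec_divide_ant_cons string out) := by unfold Spec_divide_ant_cons; infer_instance

-- ===== CLAIM (what is proved, stated in full; the proofs are below) =====
def Claim_equal_divide_ant_cons : Prop := ∀ (string : String), Dom_divide_ant_cons string → Spec_divide_ant_cons string (divide_ant_cons string)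

-- ===== LEMMAS AND PROOFS =====

theorem pvALoop_shift (l : List Char) : ∀ n i, pvALoop l n i = i + pvALoop l n 0 := by
  induction l with
  | nil => intro n i; simp [pvALoop]
  | cons c rest ih =>
    intro n i
    by_cases h : c = ',' ∧ n = 0
    · simp [pvALoop, h]
    · simp only [pvALoop, if_neg h]
      rw [ih _ (i + 1), ih _ 1]
      omega

theorem pvFind_shift (xs : List (Char × Int)) : ∀ k, pvFind xs (k + 1) = (pvFind xs k).map (· + 1) := by
  induction xs with
  | nil => intro k; simp [pvFind]
  | cons p rest ih =>
    intro k
    obtain ⟨c, d⟩ := p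
    by_cases h : c = ',' ∧ d = 0
    · simp [pvFind, h]
    · simp only [pvFind, if_neg h]
      exact ih (k + 1)

theorem pvUpdate_eq (c : Char) (n : Int) :
    (if c = '(' then n + 1 else if c = ')' then n - 1 else n) = n + pvDelta c := by
  unfold pvDelta
  by_cases h1 : c = '(' <;> by_cases h2 : c = ')' <;> simp [h1, h2] at *; omega

theorem pvKey (l : List Char) : ∀ n, pvALoop l n 0 = (pvFind (l.zip (pvDepths l n)) 0).getD l.length := by
  induction l with
  | nil => intro n; simp [pvALoop, pvDepths, pvFind]
  | cons c rest ih =>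
    intro n
    simp only [pvDepths, List.zip_cons_cons]
    by_cases h : c = ',' ∧ n = 0
    · simp [pvALoop, pvFind, h]
    · simp only [pvALoop, pvFind, if_neg h]
      rw [pvALoop_shift, pvUpdate_eq, pvFind_shift, ih (n + pvDelta c)]
      cases pvFind (rest.zip (pvDepths rest (n + pvDelta c))) 0 <;> simp [List.length_cons] <;> omega

-- ===== VERDICT (by name: the statement is the Claim_ definition above) =====
theorem divide_ant_cons_spec : Claim_equal_divide_ant_cons := by
  intro s _
  show _ = _
  simp only [divide_ant_cons, divide_ant_cons_alt]
  rw [pvKey]
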